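-- pv_equiv track=rewrite | github.com/ChalmersGU-data-structure-courses/lab-system | exam/_2021_06_03_exam/question2.py | merge_sort_bottom_up_step
-- ===== SOURCE A (Python) =====
-- class CachingIterator:
--     def advance(self):
--         try:
--             self.v = next(self.it)
--         except StopIteration:
--             self.v = None
--
--     def __init__(self, it):
--         self.it = iter(it)
--         self.advance()
--
--     def value(self):
--         return self.v
--
--     def next(self):
--         '''
--         Stores the next value and returns the previous value.
--         '''
--         old = self.v
--         self.advance()
--         return old
--
-- def merge(xs, ys):
--     ix = CachingIterator(xs)
--     iy = CachingIterator(ys)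
--     while not (ix.value() is None and iy.value() is None):
--         yield (ix if iy.value() is None or (ix.value() is not None and ix.value() <= iy.value()) else iy).next()
--
-- def merge_sort_bottom_up_step(xss):
--     it = iter(xss)
--     while True:
--         tss = []
--         try:
--             for i in range(2):
--                 tss.append(next(it))
--             yield list(merge(*tss))
--         except StopIteration:
--             if tss:
--                 yield tss[0]
--             return
-- ===== SOURCE B (Python) =====
-- def _merge_pair(a, b):
--     out = []
--     i = j = 0
--     while i < len(a) and j < len(b):
--         if a[i] <= b[j]:
--             out.append(a[i])
--             i += 1
--         else:
--             out.append(b[j])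
--             j += 1
--     out.extend(a[i:])
--     out.extend(b[j:])
--     return out
--
-- def merge_sort_bottom_up_step(xss):
--     it = iter(xss)
--     for a, b in zip(it, it):
--         yield _merge_pair(a, b)
--     if len(xss) % 2:
--         yield xss[-1]
-- ===== Notes on version B (the rewrite author's own statement) =====
-- stated objective: simpler
-- what changed: The CachingIterator class and the generator-based merge that walks element by element to full exhaustion with None sentinels are replaced by zip(it, it) pairing plus an index two-pointer merge that exits as soon as one list is exhausted and extends the output with the remaining tails in one slice step; the odd leftover is yielded via len(xss) % 2 and xss[-1]. (constant-factor speedup: no per-element generator/CachingIterator overhead, bulk tail extension)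
import Mathlib
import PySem

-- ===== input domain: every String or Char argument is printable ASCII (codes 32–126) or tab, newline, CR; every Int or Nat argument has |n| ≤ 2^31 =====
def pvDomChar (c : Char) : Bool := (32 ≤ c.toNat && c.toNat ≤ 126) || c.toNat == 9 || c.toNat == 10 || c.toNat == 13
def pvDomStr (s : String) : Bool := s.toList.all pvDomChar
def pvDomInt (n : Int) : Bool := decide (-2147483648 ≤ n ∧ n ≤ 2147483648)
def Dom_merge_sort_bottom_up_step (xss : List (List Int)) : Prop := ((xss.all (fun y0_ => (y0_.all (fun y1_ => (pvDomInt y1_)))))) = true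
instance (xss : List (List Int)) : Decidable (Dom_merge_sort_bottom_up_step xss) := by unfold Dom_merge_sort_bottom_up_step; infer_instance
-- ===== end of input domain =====

-- B drops the CachingIterator class and the element-by-element generator merge: it pairs the
-- lists with zip(it, it), merges each pair with an index two-pointer loop that exits as soon as
-- one side is exhausted and extends with the remaining tails, and appends the odd leftover.
-- Objective: simpler; equivalence of the return values is proved on all inputs.


-- ===== PORT A =====
-- A's `merge` generator over two CachingIterators: while either iterator still has a value,
-- yield from xs when ys is exhausted or both have values and xs' head <= ys' head, else from ys.
def pvMergeA : List Int → List Int → List Int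
  | [], [] => []
  | x :: xs, [] => x :: pvMergeA xs []
  | [], y :: ys => y :: pvMergeA [] ys
  | x :: xs, y :: ys =>
      if x ≤ y then x :: pvMergeA xs (y :: ys) else y :: pvMergeA (x :: xs) ys

-- outer loop: take two lists from the iterator, yield their merge; on StopIteration a lone
-- leftover (tss = [a]) is yielded as is
def merge_sort_bottom_up_step : List (List Int) → List (List Int)
  | [] => []
  | [ts] => [ts]
  | a :: b :: rest => pvMergeA a b :: merge_sort_bottom_up_step rest

-- ===== PORT B =====
-- Source B _merge_pair: while i < len(a) and j < len(b) compare a[i], b[j] and append the smaller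
-- (ties from a); then out.extend(a[i:]); out.extend(b[j:]).  a[i] is in range inside the guard,
-- so List.getD is exact; a[i:] with 0 ≤ i ≤ len(a) is exactly List.drop i (hand-ported slice).
def pvMergePairGo (a b : List Int) (i j : Nat) (out : List Int) : List Int :=
  if i < a.length ∧ j < b.length then
    if a.getD i 0 ≤ b.getD j 0 then
      pvMergePairGo a b (i + 1) j (out ++ [a.getD i 0])
    else
      pvMergePairGo a b i (j + 1) (out ++ [b.getD j 0])
  else out ++ a.drop i ++ b.drop j
termination_by a.length + b.length - (i + j)
decreasing_by all_goals omega

def pvMergePair (a b : List Int) : List Int := pvMergePairGo a b 0 0 []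

-- for a, b in zip(it, it): yield _merge_pair(a, b)
def pvMergePairs : List (List Int) → List (List Int)
  | a :: b :: rest => pvMergePair a b :: pvMergePairs rest
  | _ => []

-- if len(xss) % 2: yield xss[-1]   (inside the guard xss ≠ [], so xss[-1] is exactly getLast?)
def merge_sort_bottom_up_step_alt (xss : List (List Int)) : List (List Int) :=
  pvMergePairs xss ++ (if xss.length % 2 = 1 then xss.getLast?.toList else [])

-- ===== PRECONDITION & SPEC =====
def Spec_merge_sort_bottom_up_step (xss : List (List Int)) (out : List (List Int)) : Prop := out = merge_sort_bottom_up_step_alt xss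
instance (xss : List (List Int)) (out : List (List Int)) : Decidable (Spec_merge_sort_bottom_up_step xss out) := by unfold Spec_merge_sort_bottom_up_step; infer_instance

-- ===== CLAIM (what is proved, stated in full; the proofs are below) =====
def Claim_equal_merge_sort_bottom_up_step : Prop := ∀ (xss : List (List Int)), Dom_merge_sort_bottom_up_step xss → Spec_merge_sort_bottom_up_step xss (merge_sort_bottom_up_step xss)

-- ===== LEMMAS AND PROOFS =====

theorem pvMergeA_nil_right (a : List Int) : pvMergeA a [] = a := by
  induction a with
  | nil => simp [pvMergeA]
  | cons x xs ih => simp [pvMergeA, ih]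

theorem pvMergeA_nil_left (b : List Int) : pvMergeA [] b = b := by
  induction b with
  | nil => simp [pvMergeA]
  | cons y ys ih => simp [pvMergeA, ih]

theorem pvMergePairGo_eq (a b : List Int) (i j : Nat) (out : List Int) :
    pvMergePairGo a b i j out = out ++ pvMergeA (a.drop i) (b.drop j) := by
  fun_induction pvMergePairGo a b i j out with
  | case1 i j out h hle ih =>
      obtain ⟨hi, hj⟩ := h
      simp only [List.getD_eq_getElem?_getD, List.getElem?_eq_getElem hi,
        List.getElem?_eq_getElem hj, Option.getD_some] at hle ih ⊢
      rw [ih, List.drop_eq_getElem_cons hi, List.drop_eq_getElem_cons hj]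
      simp only [pvMergeA, if_pos hle]
      simp
  | case2 i j out h hle ih =>
      obtain ⟨hi, hj⟩ := h
      simp only [List.getD_eq_getElem?_getD, List.getElem?_eq_getElem hi,
        List.getElem?_eq_getElem hj, Option.getD_some] at hle ih ⊢
      rw [ih, List.drop_eq_getElem_cons hi, List.drop_eq_getElem_cons hj]
      simp only [pvMergeA, if_neg hle]
      simp
  | case3 i j out h =>
      rcases Decidable.not_and_iff_or_not.mp h with hi | hj
      · rw [show a.drop i = [] from List.drop_eq_nil_of_le (by omega)]
        simp [pvMergeA_nil_left]
      · rw [show b.drop j = [] from List.drop_eq_nil_of_le (by omega)]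
        simp [pvMergeA_nil_right]

theorem pvMergePair_eq (a b : List Int) : pvMergePair a b = pvMergeA a b := by
  simp [pvMergePair, pvMergePairGo_eq]

-- ===== VERDICT (by name: the statement is the Claim_ definition above) =====
theorem merge_sort_bottom_up_step_spec : Claim_equal_merge_sort_bottom_up_step := by
  intro xss hdom
  unfold Spec_merge_sort_bottom_up_step
  induction xss using merge_sort_bottom_up_step.induct with
  | case1 => rfl
  | case2 ts => rfl
  | case3 a b rest ih =>
      simp only [merge_sort_bottom_up_step, merge_sort_bottom_up_step_alt, pvMergePairs,
        pvMergePair_eq, List.cons_append, List.cons.injEq, true_and] at *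
      have hdomrest : Dom_merge_sort_bottom_up_step rest := by
        simp [Dom_merge_sort_bottom_up_step] at hdom ⊢; exact hdom.2.2
      rw [ih hdomrest]
      have hlen : (a :: b :: rest).length % 2 = rest.length % 2 := by simp; omega
      rw [hlen]
      split_ifs with hodd
      · cases rest with
        | nil => simp at hodd
        | cons c t => simp [List.getLast?_cons_cons]
      · rfl
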